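-- pv_equiv track=rewrite | github.com/Matthew-Neba/tensorgrad | tensorgrad/engine.py | ndindex
-- ===== SOURCE A (Python) =====
-- def ndindex(shape: tuple):
--     """Yield all valid N-D index tuples for the provided shape."""
--     def helper(dim):
--         if dim == len(shape):
--             yield ()
--             return
--         # iterate over all possible indices, return a tuple
--         for i in range(shape[dim]):
--             for next_tuple in helper(dim + 1):
--                 yield (i,) + next_tuple
--
--     yield from helper(0)
-- ===== SOURCE B (Python) =====
-- def ndindex(shape: tuple):
--     """Yield all valid N-D index tuples for the provided shape."""
--     out = [()]
--     for d in shape: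
--         out = [p + (i,) for p in out for i in range(d)]
--     yield from out
-- ===== Notes on version B (the rewrite author's own statement) =====
-- stated objective: alternative
-- what changed: Replaced the suffix-building recursive generator with an iterative left-to-right fold that extends materialized index prefixes axis by axis.
import Mathlib
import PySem

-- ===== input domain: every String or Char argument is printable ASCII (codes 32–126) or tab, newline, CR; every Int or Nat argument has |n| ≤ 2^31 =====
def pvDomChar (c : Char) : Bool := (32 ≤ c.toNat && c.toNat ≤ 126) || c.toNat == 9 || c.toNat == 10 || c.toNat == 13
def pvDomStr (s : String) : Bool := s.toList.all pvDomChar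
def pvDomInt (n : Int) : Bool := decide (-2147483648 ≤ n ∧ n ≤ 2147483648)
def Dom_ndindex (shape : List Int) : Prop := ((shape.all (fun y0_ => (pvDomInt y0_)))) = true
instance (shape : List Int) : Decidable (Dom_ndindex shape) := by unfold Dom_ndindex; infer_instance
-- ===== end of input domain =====

-- B replaces the recursive suffix-building generator with an iterative fold extending index prefixes; same output order, no speed claim.


-- ===== PORT A =====
-- helper(dim): recursion on the remaining suffix of shape (dim == len(shape) ↦ suffix = [])
def ndindexHelper (rest : List Int) : List (List Int) :=
  match rest with
  | [] => [[]]
  | d :: rest' =>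
      (PySem.List.pyRange 0 d 1).flatMap (fun i => (ndindexHelper rest').map (fun t => i :: t))

def ndindex (shape : List Int) : List (List Int) := ndindexHelper shape

-- ===== PORT B =====
def ndindex_alt (shape : List Int) : List (List Int) :=
  shape.foldl
    (fun out d => out.flatMap (fun p => (PySem.List.pyRange 0 d 1).map (fun i => p ++ [i])))
    [[]]

-- ===== PRECONDITION & SPEC =====
def Spec_ndindex (shape : List Int) (out : List (List Int)) : Prop := out = ndindex_alt shape
instance (shape : List Int) (out : List (List Int)) : Decidable (Spec_ndindex shape out) := by unfold Spec_ndindex; infer_instance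

-- ===== CLAIM (what is proved, stated in full; the proofs are below) =====
def Claim_equal_ndindex : Prop := ∀ (shape : List Int), Dom_ndindex shape → Spec_ndindex shape (ndindex shape)

-- ===== LEMMAS AND PROOFS =====
theorem ndindex_fold_invariant (rest : List Int) :
    ∀ (acc : List (List Int)),
      rest.foldl
        (fun out d => out.flatMap (fun p => (PySem.List.pyRange 0 d 1).map (fun i => p ++ [i])))
        acc
      = acc.flatMap (fun p => (ndindexHelper rest).map (fun t => p ++ t)) := by
  induction rest with
  | nil => intro acc; simp [ndindexHelper]
  | cons d rest' ih =>
      intro acc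
      simp only [List.foldl_cons, ih, ndindexHelper]
      simp only [List.flatMap_assoc, List.map_flatMap, List.flatMap_map, List.map_map,
        Function.comp_def, List.append_assoc, List.cons_append, List.nil_append]

-- ===== VERDICT (by name: the statement is the Claim_ definition above) =====
theorem ndindex_spec : Claim_equal_ndindex := by
  intro shape _
  unfold Spec_ndindex ndindex ndindex_alt
  rw [ndindex_fold_invariant]
  simp
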